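-- pv_equiv track=rewrite | github.com/ZeweiSong/rRNA-Project | rrna_parser/data_io.py | kmer
-- ===== SOURCE A (Python) =====
-- def revcomp(seq):
--     return seq.translate(str.maketrans('ACGTacgtRYMKrymkVBHDvbhdN', 'TGCAtgcaYRKMyrkmBVDHbvdhN'))[::-1]
--
-- def kmer(seq, size):
--     seq = seq.upper()
--     seq_length = len(seq)
--     kmer = []
--     for i in range(seq_length - size + 1):
--         kmer.append(seq[i:i+size])
--     seq_rev = revcomp(seq)
--     for i in range(seq_length - size + 1):
--         kmer.append(seq_rev[i:i+size])
--     return kmer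
-- ===== SOURCE B (Python) =====
-- _RC_TABLE = str.maketrans('ACGTacgtRYMKrymkVBHDvbhdN', 'TGCAtgcaYRKMyrkmBVDHbvdhN')
--
-- def revcomp(seq):
--     return seq.translate(_RC_TABLE)[::-1]
--
-- def kmer(seq, size):
--     # Single pass with two accumulators: one while loop slides the window once,
--     # appending each window to the front half and its per-window reverse
--     # complement to the back half, which is reversed once at the end; no
--     # separate revcomp string and no second scan.
--     s = seq.upper()
--     n = len(s)
--     front = []
--     back = []
--     i = 0
--     while i < n - size + 1:
--         w = s[i:i + size]
--         front.append(w)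
--         back.append(revcomp(w))
--         i += 1
--     return front + back[::-1]
-- ===== Notes on version B (the rewrite author's own statement) =====
-- stated objective: alternative
-- what changed: B is a single while-loop pass with two accumulators: each window is appended to the forward half and its per-window reverse complement to a back half that is reversed once at the end, replacing A's two independent sliding-window scans and its whole-string revcomp construction.
-- intended difference: For size < 0 with len(seq)+size >= 1 (k-mer size below 1 is unspecified) A's second window takes negative-stop wraparound slices of the revcomp string, e.g. ['A','','','','G','','',''] on ('AC',-1), while B returns the per-window reverse complements of the forward slices, ['A','','','','','','','T'], the consistent generalization of the identity B uses. — e.g. on kmer("AC", -1): A returns ["A", "", "", "", "G", "", "", ""], B returns ["A", "", "", "", "", "", "", "T"]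
import Mathlib
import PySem

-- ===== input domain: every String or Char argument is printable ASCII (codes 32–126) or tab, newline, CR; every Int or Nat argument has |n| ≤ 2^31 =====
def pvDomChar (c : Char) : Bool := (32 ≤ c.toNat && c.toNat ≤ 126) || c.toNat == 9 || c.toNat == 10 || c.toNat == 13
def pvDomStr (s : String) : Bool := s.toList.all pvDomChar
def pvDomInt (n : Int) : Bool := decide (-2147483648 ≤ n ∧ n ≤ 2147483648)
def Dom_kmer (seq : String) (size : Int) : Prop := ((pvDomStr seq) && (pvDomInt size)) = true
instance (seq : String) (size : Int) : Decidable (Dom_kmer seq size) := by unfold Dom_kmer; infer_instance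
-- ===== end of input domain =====

-- B is one while-loop pass appending each window to a front accumulator and appending its
-- per-window reverse complement to a back accumulator reversed once at the end, instead of A's two sliding-window scans
-- over the string and a separately built revcomp string; same cost, different decomposition.


-- shared module helper: str.maketrans table of revcomp (one-char to one-char; chars not in the table unchanged)
def rcChar (c : Char) : Char :=
  match c with
  | 'A' => 'T' | 'C' => 'G' | 'G' => 'C' | 'T' => 'A'
  | 'a' => 't' | 'c' => 'g' | 'g' => 'c' | 't' => 'a'
  | 'R' => 'Y' | 'Y' => 'R' | 'M' => 'K' | 'K' => 'M'
  | 'r' => 'y' | 'y' => 'r' | 'm' => 'k' | 'k' => 'm'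
  | 'V' => 'B' | 'B' => 'V' | 'H' => 'D' | 'D' => 'H'
  | 'v' => 'b' | 'b' => 'v' | 'h' => 'd' | 'd' => 'h'
  | 'N' => 'N'
  | _ => c

-- revcomp(seq): translate is a char-wise map (all table entries are single chars) and [::-1] is reverse
def revcompChars (cs : List Char) : List Char := (cs.map rcChar).reverse

-- ===== PORT A =====
def kmer (seq : String) (size : Int) : List String :=
  let s := PySem.Chars.upper seq.toList
  let n : Int := s.length
  let k1 := (PySem.List.pyRange 0 (n - size + 1) 1).foldl
    (fun acc i => acc ++ [String.ofList (PySem.List.slice s (some i) (some (i + size)))]) []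
  let sr := revcompChars s
  (PySem.List.pyRange 0 (n - size + 1) 1).foldl
    (fun acc i => acc ++ [String.ofList (PySem.List.slice sr (some i) (some (i + size)))]) k1

-- ===== PORT B =====
-- the while loop of Source B: one pass, two accumulators, back reversed once at the end
def kmerAltLoop (s : List Char) (size stop i : Int) (front back : List String) : List String :=
  if i < stop then
    let w := PySem.List.slice s (some i) (some (i + size))
    kmerAltLoop s size stop (i + 1) (front ++ [String.ofList w])
      (back ++ [String.ofList (revcompChars w)])
  else
    front ++ back.reverse
termination_by (stop - i).toNat
decreasing_by omega

def kmer_alt (seq : String) (size : Int) : List String :=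
  let s := PySem.Chars.upper seq.toList
  let n : Int := s.length
  kmerAltLoop s size (n - size + 1) 0 [] []

-- ===== PRECONDITION & SPEC =====
-- On size < 0 with len(seq) + size >= 1 both programs return: A's second window then takes Python
-- negative-stop wraparound slices of the revcomp string, while B returns the per-window reverse
-- complements of the forward slices — k-mer size below 1 is unspecified, and B's value is the
-- consistent generalization of the k-mer identity it uses.
def D_kmer (seq : String) (size : Int) : Prop := size < 0 ∧ 1 ≤ (seq.toList.length : Int) + size
instance (seq : String) (size : Int) : Decidable (D_kmer seq size) := by unfold D_kmer; infer_instance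

def Spec_kmer (seq : String) (size : Int) (out : List String) : Prop := ¬ D_kmer seq size → out = kmer_alt seq size
instance (seq : String) (size : Int) (out : List String) : Decidable (Spec_kmer seq size out) := by unfold Spec_kmer; infer_instance

def pvDiffWitness_kmer : String × Int := ("AC", -1)
def pvDiffWitnessOut_kmer : (List String) × (List String) :=
  (["A", "", "", "", "G", "", "", ""], ["A", "", "", "", "", "", "", "T"])

-- ===== CLAIM (what is proved, stated in full; the proofs are below) =====
def Claim_unchanged_kmer : Prop := ∀ (seq : String) (size : Int), Dom_kmer seq size → Spec_kmer seq size (kmer seq size)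
def Claim_exact_kmer : Prop := ∀ (seq : String) (size : Int), Dom_kmer seq size → D_kmer seq size → kmer seq size ≠ kmer_alt seq size
def Claim_changed_kmer : Prop := Dom_kmer (pvDiffWitness_kmer.1) (pvDiffWitness_kmer.2) ∧ D_kmer (pvDiffWitness_kmer.1) (pvDiffWitness_kmer.2) ∧ kmer (pvDiffWitness_kmer.1) (pvDiffWitness_kmer.2) = pvDiffWitnessOut_kmer.1 ∧ kmer_alt (pvDiffWitness_kmer.1) (pvDiffWitness_kmer.2) = pvDiffWitnessOut_kmer.2 ∧ pvDiffWitnessOut_kmer.1 ≠ pvDiffWitnessOut_kmer.2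

-- ===== LEMMAS AND PROOFS =====

-- the while loop in closed form: front, the forward windows, then (back + per-window revcomps) reversed
theorem kmerAltLoop_eq (s : List Char) (size stop : Int) :
    ∀ (fuel : Nat) (i : Int) (front back : List String), (stop - i).toNat = fuel →
    kmerAltLoop s size stop i front back =
      front ++ (PySem.List.pyRange i stop 1).map
          (fun j => String.ofList (PySem.List.slice s (some j) (some (j + size)))) ++
        (back ++ (PySem.List.pyRange i stop 1).map
          (fun j => String.ofList (revcompChars (PySem.List.slice s (some j) (some (j + size)))))).reverse := by
  intro fuel
  induction fuel with
  | zero =>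
    intro i front back hf
    rw [kmerAltLoop, if_neg (by omega), PySem.List.pyRange_one_eq_nil (by omega)]
    simp
  | succ m ih =>
    intro i front back hf
    by_cases h : i < stop
    · rw [kmerAltLoop, if_pos h, ih (i + 1) _ _ (by omega),
        PySem.List.pyRange_one_cons h]
      simp
    · rw [kmerAltLoop, if_neg h, PySem.List.pyRange_one_eq_nil (by omega)]
      simp

-- B in the same map normal form as A's folds
theorem kmer_alt_eq (seq : String) (size : Int) :
    kmer_alt seq size =
      (PySem.List.pyRange 0 (((PySem.Chars.upper seq.toList).length : Int) - size + 1) 1).map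
          (fun j => String.ofList (PySem.List.slice (PySem.Chars.upper seq.toList) (some j) (some (j + size)))) ++
        ((PySem.List.pyRange 0 (((PySem.Chars.upper seq.toList).length : Int) - size + 1) 1).map
          (fun j => String.ofList (revcompChars (PySem.List.slice (PySem.Chars.upper seq.toList) (some j) (some (j + size)))))).reverse := by
  unfold kmer_alt
  rw [kmerAltLoop_eq _ _ _ _ 0 [] [] rfl]
  simp

-- a window of the reversed list is the reversed mirror window
theorem rev_window {α : Type} (ys : List α) (K j : Nat) (hj : j + K ≤ ys.length) :
    (ys.reverse.drop j).take K = ((ys.drop (ys.length - K - j)).take K).reverse := by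
  rw [List.drop_reverse, List.take_reverse, List.drop_take, List.length_take]
  have h1 : min (ys.length - j) ys.length - K = ys.length - K - j := by omega
  rw [h1]
  have h2 : ys.length - j - (ys.length - K - j) = K := by omega
  rw [h2]

theorem kmer_eq (seq : String) (size : Int) (h : 0 ≤ size) : kmer seq size = kmer_alt seq size := by
  rw [kmer_alt_eq]
  unfold kmer
  simp only [PySem.List.foldl_append_singleton_eq_map, List.nil_append]
  congr 1
  set s := PySem.Chars.upper seq.toList with hs
  set N := s.length with hN
  apply List.ext_getElem
  · simp [PySem.List.length_pyRange_one]
  intro j hj1 hj2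
  rw [List.getElem_map, List.getElem_reverse, List.getElem_map,
    PySem.List.getElem_pyRange_one, PySem.List.getElem_pyRange_one]
  simp only [List.length_map, PySem.List.length_pyRange_one, zero_add] at hj1 hj2 ⊢
  set K := size.toNat with hK
  set M := ((N : Int) - size + 1 - 0).toNat with hM
  have hjM : j < M := by omega
  have hKN : K ≤ N := by omega
  have hjK : j + K ≤ N := by omega
  set i2 : Nat := (((N:Int) - size + 1) - 0).toNat - 1 - j with hi2
  have hi2' : i2 = N - K - j := by omega
  congr 1
  rw [PySem.List.slice_toNat _ (by omega) (by omega),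
      PySem.List.slice_toNat _ (by omega) (by omega)]
  simp only [Int.toNat_natCast]
  have eb : ((j:Int) + size).toNat - j = K := by omega
  have ed : ((i2:Int) + size).toNat - i2 = K := by omega
  rw [eb, ed, hi2']
  show List.take K (List.drop j (revcompChars s)) =
    revcompChars (List.take K (List.drop (N - K - j) s))
  unfold revcompChars
  rw [List.map_take, List.map_drop]
  have := rev_window (s.map rcChar) K j (by simpa using hjK)
  simpa using this

-- when len(seq) + size <= 0 every slice on either side is empty and both return the same list of empty strings
theorem empty_slice {α : Type} (xs : List α) (size i : Int)
    (hsz : (xs.length : Int) + size ≤ 0) (hi : 0 ≤ i) :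
    PySem.List.slice xs (some i) (some (i + size)) = [] := by
  have h := PySem.List.length_slice xs i (i + size)
  have hle : PySem.List.clampIdx xs.length (i + size) ≤ PySem.List.clampIdx xs.length i := by
    simp only [PySem.List.clampIdx]
    split_ifs <;> omega
  rw [← List.length_eq_zero_iff]
  omega

theorem kmer_eq_neg (seq : String) (size : Int)
    (h2 : (seq.toList.length : Int) + size ≤ 0) : kmer seq size = kmer_alt seq size := by
  rw [kmer_alt_eq]
  unfold kmer
  simp only [PySem.List.foldl_append_singleton_eq_map, List.nil_append]
  set s := PySem.Chars.upper seq.toList with hs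
  have hlen : s.length = seq.toList.length := by
    rw [hs]; unfold PySem.Chars.upper; exact List.length_map ..
  have hlenr : (revcompChars s).length = seq.toList.length := by
    unfold revcompChars; simp [hlen]
  have hempty : ∀ (xs : List Char), xs.length = seq.toList.length →
      ∀ i ∈ PySem.List.pyRange 0 ((s.length : Int) - size + 1) 1,
      PySem.List.slice xs (some i) (some (i + size)) = [] := by
    intro xs hxs i hi
    exact empty_slice xs size i (by omega) ((PySem.List.mem_pyRange_one.mp hi).1)
  set R := PySem.List.pyRange 0 ((s.length : Int) - size + 1) 1 with hR
  have e1 : List.map (fun i => String.ofList (PySem.List.slice s (some i) (some (i + size)))) R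
      = List.map (fun _ => String.ofList ([] : List Char)) R :=
    List.map_congr_left (fun i hi => by rw [hempty s hlen i hi])
  have e2 : List.map (fun i => String.ofList (PySem.List.slice (revcompChars s) (some i) (some (i + size)))) R
      = List.map (fun _ => String.ofList ([] : List Char)) R :=
    List.map_congr_left (fun i hi => by rw [hempty (revcompChars s) hlenr i hi])
  have e4 : List.map (fun i => String.ofList (revcompChars (PySem.List.slice s (some i) (some (i + size))))) R
      = List.map (fun _ => String.ofList ([] : List Char)) R :=
    List.map_congr_left (fun i hi => by
      rw [hempty s hlen i hi]
      simp [revcompChars])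
  rw [e1, e2, e4]
  simp

-- ===== VERDICT (by name: the statement is the Claim_ definition above) =====
theorem kmer_spec : Claim_unchanged_kmer := by
  intro seq size _ hnd
  by_cases h : 0 ≤ size
  · exact kmer_eq seq size h
  · unfold D_kmer at hnd
    push Not at hnd
    exact kmer_eq_neg seq size (by omega)

theorem kmer_changed : Claim_changed_kmer := by
  unfold Claim_changed_kmer
  refine ⟨by decide, by decide, by decide, ?_, by decide⟩
  rw [kmer_alt_eq]
  decide

theorem kmer_tight : Claim_exact_kmer := by
  intro seq size _ hD heq
  obtain ⟨hneg, hlen1⟩ := hD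
  rw [kmer_alt_eq] at heq
  unfold kmer at heq
  simp only [PySem.List.foldl_append_singleton_eq_map, List.nil_append] at heq
  set s := PySem.Chars.upper seq.toList with hs
  have hlen : s.length = seq.toList.length := by
    rw [hs]; unfold PySem.Chars.upper; exact List.length_map ..
  have htl := List.append_cancel_left heq
  set n := s.length with hn
  set R := PySem.List.pyRange 0 ((n : Int) - size + 1) 1 with hR
  have hm : R.length = ((n : Int) - size + 1).toNat := by
    rw [hR]; simp [PySem.List.length_pyRange_one]
  have hmpos : 1 ≤ ((n : Int) - size + 1).toNat := by omega
  have hval := congrArg (fun l => l[0]?) htl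
  have hlb : (0 : Nat) < (List.map (fun i => String.ofList (revcompChars (PySem.List.slice s (some i) (some (i + size))))) R).length := by
    simp [hm]; omega
  simp only at hval
  rw [List.getElem?_reverse hlb] at hval
  simp only [List.getElem?_map, List.length_map, hm] at hval
  rw [hR, PySem.List.getElem?_pyRange_one, PySem.List.getElem?_pyRange_one] at hval
  rw [if_pos (by omega), if_pos (by omega)] at hval
  simp only [Option.map_some, Option.some.injEq] at hval
  have hL := congrArg String.toList hval
  have hlens := congrArg List.length hL
  simp only [String.toList_ofList, Nat.sub_zero, zero_add, Nat.cast_zero] at hlens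
  unfold revcompChars at hlens
  simp only [List.length_reverse, List.length_map, PySem.List.length_slice] at hlens
  rw [← hn] at hlens
  set j : Nat := ((n : Int) - size + 1).toNat - 1 with hj
  have c1 : PySem.List.clampIdx n size = ((n : Int) + size).toNat := by
    simp only [PySem.List.clampIdx]; split_ifs <;> omega
  have c2 : PySem.List.clampIdx n 0 = 0 := by
    simp only [PySem.List.clampIdx]; split_ifs <;> omega
  have c3 : PySem.List.clampIdx n (j : Int) = n := by
    simp only [PySem.List.clampIdx]; split_ifs <;> omega
  have c4 : PySem.List.clampIdx n ((j : Int) + size) = n := by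
    simp only [PySem.List.clampIdx]; split_ifs <;> omega
  rw [c1, c2, c3, c4] at hlens
  omega
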